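-- pv_equiv track=rewrite | github.com/kiranjithkrish/DS_Algo_Python | MinPassMatrix.py | getNegetives
-- ===== SOURCE A (Python) =====
-- def getNegetives(matrix):
--     queue = getAllPositiveIndices(matrix)
--     passes = 0
--
--     while len(queue)>0:
--         passBy = len(queue)
--         while passBy>0:
--             row,column  = queue.pop(0)
--             neighbours = getAllNeighbours(row, column, matrix)
--             for neighbour in neighbours:
--                 row, column = neighbour
--                 if matrix[row][column]<0:
--                     matrix[row][column] = matrix[row][column]*-1
--                     queue.append(neighbour)
--             passBy -= 1
--         passes += 1
--     return passes
--
-- def getAllPositiveIndices(matrix):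
--     positiveIndices = []
--     for row in range(len(matrix)):
--         for column in range(len(matrix[row])):
--             if matrix[row][column]>0:
--                 positiveIndices.append([row,column])
--     return positiveIndices
--
-- def getAllNeighbours(row, column, matrix):
--     neighbours = []
--     if row>0:
--         neighbours.append([row-1, column])
--     if row<len(matrix)-1:
--         neighbours.append([row+1, column])
--     if column>0:
--         neighbours.append([row, column-1])
--     if column<len(matrix[0])-1:
--         neighbours.append([row, column+1])
--     return neighbours
-- ===== SOURCE B (Python) =====
-- def getNegetives(matrix):
--     # Round-by-round simulation instead of a queue BFS; works on a copy (A mutates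
--     # its argument in place; the equivalence claimed is about the return value only).
--     if not any(v > 0 for row in matrix for v in row):
--         return 0
--     grid = [row[:] for row in matrix]
--     rows, cols = len(grid), len(grid[0])
--     r = 0
--     while True:
--         flips = [(i, j)
--                  for i in range(rows) for j in range(cols)
--                  if grid[i][j] < 0 and (
--                      (i > 0 and grid[i - 1][j] > 0) or
--                      (i + 1 < rows and grid[i + 1][j] > 0) or
--                      (j > 0 and grid[i][j - 1] > 0) or
--                      (j + 1 < cols and grid[i][j + 1] > 0))]
--         if not flips:
--             return r + 1
--         for i, j in flips:
--             grid[i][j] = -grid[i][j]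
--         r += 1
-- ===== Notes on version B (the rewrite author's own statement) =====
-- stated objective: simpler
-- what changed: Replaces the mutable queue-based level BFS (pop(0)/append with a passBy counter) by a round-by-round fixpoint simulation on a copy: each round collects all negative cells 4-adjacent to a positive cell and flips them simultaneously, returning rounds+1 (0 if no positive cell); B also does not mutate the argument.
-- outside the precondition, e.g. on getNegetives([[1, 0], [0]]): A returns 1, B raises IndexError; on getNegetives([[1, 0], [0, 0, 0]]): A returns 1, B returns 1
import Mathlib
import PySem

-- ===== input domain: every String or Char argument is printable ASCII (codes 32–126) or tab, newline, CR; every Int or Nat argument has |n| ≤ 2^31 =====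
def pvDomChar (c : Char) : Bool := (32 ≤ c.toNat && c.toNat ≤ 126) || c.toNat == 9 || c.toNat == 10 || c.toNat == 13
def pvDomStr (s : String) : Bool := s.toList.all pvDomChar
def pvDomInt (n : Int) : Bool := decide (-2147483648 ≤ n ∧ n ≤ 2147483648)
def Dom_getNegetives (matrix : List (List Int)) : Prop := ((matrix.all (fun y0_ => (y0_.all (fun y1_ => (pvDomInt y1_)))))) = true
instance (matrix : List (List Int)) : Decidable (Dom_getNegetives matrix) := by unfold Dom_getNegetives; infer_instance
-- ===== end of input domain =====

-- B replaces A's queue-based level BFS by a round-by-round fixpoint simulation on a copy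
-- (objective: simpler).  A mutates its `matrix` argument in place, B does not: the
-- equivalence proved here is about the RETURN value only.

-- shared low-level matrix access (exact for the in-range, nonnegative indices both programs use)
def pvGN (M : List (List Int)) (i j : Nat) : Int := (M.getD i []).getD j 0
def pvSN (M : List (List Int)) (i j : Nat) (v : Int) : List (List Int) :=
  M.set i ((M.getD i []).set j v)

-- ===== PORT A =====
-- matrix[r][c] / assignment with Python int indices; A only ever indexes in range with
-- nonnegative indices (guards r>0, r<len-1, …), where .toNat is exact
def pvMGet (M : List (List Int)) (r c : Int) : Int := pvGN M r.toNat c.toNat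
def pvMSet (M : List (List Int)) (r c : Int) (v : Int) : List (List Int) := pvSN M r.toNat c.toNat v

def getAllPositiveIndicesA (M : List (List Int)) : List (Int × Int) :=
  (List.range M.length).flatMap (fun r =>
    (List.range (M.getD r []).length).filterMap (fun c =>
      if (M.getD r []).getD c 0 > 0 then some ((r : Int), (c : Int)) else none))

def getAllNeighboursA (row column : Int) (M : List (List Int)) : List (Int × Int) :=
  (if row > 0 then [(row - 1, column)] else []) ++
  (if row < (M.length : Int) - 1 then [(row + 1, column)] else []) ++
  (if column > 0 then [(row, column - 1)] else []) ++
  (if column < ((M.headD []).length : Int) - 1 then [(row, column + 1)] else [])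

-- the body of A's `for neighbour in neighbours` loop
def stepCellA (st : List (Int × Int) × List (List Int)) (nb : Int × Int) :
    List (Int × Int) × List (List Int) :=
  if pvMGet st.2 nb.1 nb.2 < 0 then
    (st.1 ++ [nb], pvMSet st.2 nb.1 nb.2 (pvMGet st.2 nb.1 nb.2 * -1))
  else st

-- A's inner `while passBy>0` loop: recursion on passBy, popping the queue front
def innerA : Nat → List (Int × Int) → List (List Int) → List (Int × Int) × List (List Int)
  | 0, q, M => (q, M)
  | _ + 1, [], M => ([], M)  -- unreachable: passBy never exceeds the queue length
  | n + 1, q :: rest, M =>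
      let st := (getAllNeighboursA q.1 q.2 M).foldl stepCellA (rest, M)
      innerA n st.1 st.2

-- A's outer `while len(queue)>0` loop; the fuel is a totality guard only
-- (the pass count never exceeds 1 + number of cells)
def outerA : Nat → List (Int × Int) → List (List Int) → Int
  | 0, _, _ => 0
  | n + 1, q, M =>
      if q.isEmpty then 0
      else
        let st := innerA q.length q M
        1 + outerA n st.1 st.2

def getNegetives (matrix : List (List Int)) : Int :=
  outerA ((matrix.map List.length).sum + 2) (getAllPositiveIndicesA matrix) matrix

-- ===== PORT B =====
def anyPosB (M : List (List Int)) : Bool := M.any (fun row => row.any (fun v => 0 < v))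

def hasPosNbrB (M : List (List Int)) (R C i j : Nat) : Bool :=
  (decide (0 < i) && decide (0 < pvGN M (i - 1) j)) ||
  (decide (i + 1 < R) && decide (0 < pvGN M (i + 1) j)) ||
  (decide (0 < j) && decide (0 < pvGN M i (j - 1))) ||
  (decide (j + 1 < C) && decide (0 < pvGN M i (j + 1)))

def toFlipB (M : List (List Int)) (R C : Nat) : List (Nat × Nat) :=
  (List.range R).flatMap (fun i =>
    (List.range C).filterMap (fun j =>
      if pvGN M i j < 0 && hasPosNbrB M R C i j then some (i, j) else none))

def flipAllB (M : List (List Int)) (s : List (Nat × Nat)) : List (List Int) :=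
  s.foldl (fun M c => pvSN M c.1 c.2 (-(pvGN M c.1 c.2))) M

-- B's `while True` loop; the fuel is a totality guard only
def loopB : Nat → List (List Int) → Nat → Nat → Int
  | 0, _, _, _ => 0
  | n + 1, M, R, C =>
      let s := toFlipB M R C
      if s.isEmpty then 1 else 1 + loopB n (flipAllB M s) R C

def getNegetives_alt (matrix : List (List Int)) : Int :=
  if anyPosB matrix then
    loopB ((matrix.map List.length).sum + 2) matrix matrix.length (matrix.headD []).length
  else 0

-- ===== PRECONDITION & SPEC =====
-- Pre_ excludes ragged matrices that contain a positive entry: there A's neighbour bound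
-- len(matrix[0]) disagrees with the actual row lengths, so A usually raises IndexError and
-- otherwise returns an accidental value that B (which scans a len(matrix[0])-wide copy and
-- may itself raise IndexError) need not match.
def Pre_getNegetives (matrix : List (List Int)) : Prop :=
  (∀ row ∈ matrix, row.length = (matrix.headD []).length) ∨
  (∀ row ∈ matrix, ∀ x ∈ row, x ≤ 0)
instance (matrix : List (List Int)) : Decidable (Pre_getNegetives matrix) := by
  unfold Pre_getNegetives; infer_instance

def pvWitness_getNegetives : List (List Int) := [[1, -1], [0, -2]]

def Spec_getNegetives (matrix : List (List Int)) (out : Int) : Prop := out = getNegetives_alt matrix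
instance (matrix : List (List Int)) (out : Int) : Decidable (Spec_getNegetives matrix out) := by
  unfold Spec_getNegetives; infer_instance

-- ===== CLAIM (what is proved, stated in full; the proofs are below) =====
def Claim_equal_getNegetives : Prop := ∀ (matrix : List (List Int)), Dom_getNegetives matrix → Pre_getNegetives matrix → Spec_getNegetives matrix (getNegetives matrix)

-- ===== LEMMAS AND PROOFS =====

-- proof-layer vocabulary
def Shaped (R C : Nat) (M : List (List Int)) : Prop :=
  M.length = R ∧ ∀ k, k < R → (M.getD k []).length = C

def neighb (i j a b : Nat) : Prop :=
  (i = a + 1 ∧ j = b) ∨ (a = i + 1 ∧ j = b) ∨ (j = b + 1 ∧ i = a) ∨ (b = j + 1 ∧ i = a)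

def nbrQ (Q : List (Int × Int)) (a b : Nat) : Prop :=
  ∃ i j : Nat, ((i : Int), (j : Int)) ∈ Q ∧ neighb i j a b

def QB (R C : Nat) (Q : List (Int × Int)) : Prop :=
  ∀ p ∈ Q, ∃ i j : Nat, p = ((i : Int), (j : Int)) ∧ i < R ∧ j < C

def QOK (R C : Nat) (M : List (List Int)) (Q : List (Int × Int)) : Prop :=
  ∀ p ∈ Q, ∃ i j : Nat, p = ((i : Int), (j : Int)) ∧ i < R ∧ j < C ∧ 0 < pvGN M i j

def InvW (R C : Nat) (M : List (List Int)) (Q : List (Int × Int)) : Prop :=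
  ∀ a b, a < R → b < C → pvGN M a b < 0 →
    (∃ i j, i < R ∧ j < C ∧ neighb a b i j ∧ 0 < pvGN M i j) →
    ∃ i j : Nat, ((i : Int), (j : Int)) ∈ Q ∧ neighb i j a b

def nbrsN (R C i j : Nat) : List (Nat × Nat) :=
  (if 0 < i then [(i - 1, j)] else []) ++ (if i + 1 < R then [(i + 1, j)] else []) ++
  (if 0 < j then [(i, j - 1)] else []) ++ (if j + 1 < C then [(i, j + 1)] else [])

theorem pair_cast_inj (a b c d : Nat) :
    (((a : Int), (b : Int)) = ((c : Int), (d : Int))) ↔ (a = c ∧ b = d) := by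
  simp

theorem pvMGet_cast (M : List (List Int)) (a b : Nat) :
    pvMGet M (a : Int) (b : Int) = pvGN M a b := by
  simp [pvMGet, Int.toNat_natCast]

theorem pvGN_pvSN (M : List (List Int)) (i j a b : Nat) (v : Int) :
    pvGN (pvSN M i j v) a b =
      if i = a ∧ j = b ∧ i < M.length ∧ j < (M.getD i []).length then v else pvGN M a b := by
  unfold pvGN pvSN
  simp only [List.getD_eq_getElem?_getD, List.getElem?_set]
  by_cases hia : i = a
  · subst hia
    by_cases hl : i < M.length
    · have hrow : M[i]?.getD [] = M[i] := by simp [List.getElem?_eq_getElem hl]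
      simp only [hl, if_true, hrow]
      by_cases hjb : j = b
      · subst hjb
        by_cases hr : j < M[i].length
        · simp [List.getElem?_set, hr, hl]
        · simp [List.getElem?_set, hr, hl]
      · simp [List.getElem?_set, hjb, hl]
    · simp [hl]
  · simp [hia]

theorem Shaped_pvSN (R C : Nat) (M : List (List Int)) (i j : Nat) (v : Int)
    (h : Shaped R C M) : Shaped R C (pvSN M i j v) := by
  obtain ⟨h1, h2⟩ := h
  refine ⟨by simpa [pvSN] using h1, fun k hk => ?_⟩
  have hk2 := h2 k hk
  simp only [List.getD_eq_getElem?_getD, pvSN, List.getElem?_set] at *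
  by_cases hik : i = k
  · subst hik
    have hl : i < M.length := by omega
    simpa [hl] using hk2
  · simpa [hik] using hk2

theorem mat_ext (R C : Nat) (M1 M2 : List (List Int)) (h1 : Shaped R C M1) (h2 : Shaped R C M2)
    (h : ∀ a b, a < R → b < C → pvGN M1 a b = pvGN M2 a b) : M1 = M2 := by
  have e1R := h1.1
  have e2R := h2.1
  apply List.ext_getElem (by omega)
  intro n hn1 hn2
  have hnR : n < R := by omega
  have e1 : M1.getD n [] = M1[n] := List.getD_eq_getElem M1 [] hn1
  have e2 : M2.getD n [] = M2[n] := List.getD_eq_getElem M2 [] hn2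
  have l1 : M1[n].length = C := by rw [← e1]; exact h1.2 n hnR
  have l2 : M2[n].length = C := by rw [← e2]; exact h2.2 n hnR
  apply List.ext_getElem (l1.trans l2.symm)
  intro m hm1 hm2
  have hmC : m < C := by omega
  have := h n m hnR hmC
  simp only [pvGN, e1, e2] at this
  rwa [List.getD_eq_getElem _ 0 hm1, List.getD_eq_getElem _ 0 hm2] at this

theorem neighb_symm (i j a b : Nat) : neighb i j a b ↔ neighb a b i j := by
  unfold neighb; tauto

theorem mem_nbrsN (R C i j a b : Nat) (hi : i < R) (hj : j < C) :
    (a, b) ∈ nbrsN R C i j ↔ a < R ∧ b < C ∧ neighb i j a b := by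
  simp only [nbrsN, neighb, List.mem_append, List.mem_ite_nil_right, List.mem_singleton,
    Prod.mk.injEq]
  omega

theorem nbrsA_eq (R C : Nat) (M : List (List Int)) (i j : Nat) (hM : Shaped R C M)
    (hi : i < R) (hj : j < C) :
    getAllNeighboursA (i : Int) (j : Int) M =
      (nbrsN R C i j).map (fun p => ((p.1 : Int), (p.2 : Int))) := by
  obtain ⟨hR, hC⟩ := hM
  have hlen : (M.headD []).length = C := by
    cases M with
    | nil => simp at hR; omega
    | cons r t => simpa using hC 0 (by omega)
  unfold getAllNeighboursA nbrsN
  rw [hR, hlen]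
  simp only [List.map_append]
  have s1 : (if (i : Int) > 0 then [((i : Int) - 1, (j : Int))] else []) =
      (if 0 < i then [((i - 1 : Nat), j)] else []).map (fun p : Nat × Nat => ((p.1 : Int), (p.2 : Int))) := by
    by_cases h : 0 < i
    · rw [if_pos (show (i : Int) > 0 by omega), if_pos h]
      simp only [List.map_cons, List.map_nil, List.cons.injEq, Prod.mk.injEq, and_true,
        true_and, eq_self_iff_true]
      first | trivial | omega
    · rw [if_neg (show ¬((i : Int) > 0) by omega), if_neg h]
      simp
  have s2 : (if (i : Int) < (R : Int) - 1 then [((i : Int) + 1, (j : Int))] else []) =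
      (if i + 1 < R then [((i + 1 : Nat), j)] else []).map (fun p : Nat × Nat => ((p.1 : Int), (p.2 : Int))) := by
    by_cases h : i + 1 < R
    · rw [if_pos (show (i : Int) < (R : Int) - 1 by omega), if_pos h]
      simp only [List.map_cons, List.map_nil, List.cons.injEq, Prod.mk.injEq, and_true,
        true_and, eq_self_iff_true]
      first | trivial | omega
    · rw [if_neg (show ¬((i : Int) < (R : Int) - 1) by omega), if_neg h]
      simp
  have s3 : (if (j : Int) > 0 then [((i : Int), (j : Int) - 1)] else []) =
      (if 0 < j then [(i, (j - 1 : Nat))] else []).map (fun p : Nat × Nat => ((p.1 : Int), (p.2 : Int))) := by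
    by_cases h : 0 < j
    · rw [if_pos (show (j : Int) > 0 by omega), if_pos h]
      simp only [List.map_cons, List.map_nil, List.cons.injEq, Prod.mk.injEq, and_true,
        true_and, eq_self_iff_true]
      first | trivial | omega
    · rw [if_neg (show ¬((j : Int) > 0) by omega), if_neg h]
      simp
  have s4 : (if (j : Int) < (C : Int) - 1 then [((i : Int), (j : Int) + 1)] else []) =
      (if j + 1 < C then [(i, (j + 1 : Nat))] else []).map (fun p : Nat × Nat => ((p.1 : Int), (p.2 : Int))) := by
    by_cases h : j + 1 < C
    · rw [if_pos (show (j : Int) < (C : Int) - 1 by omega), if_pos h]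
      simp only [List.map_cons, List.map_nil, List.cons.injEq, Prod.mk.injEq, and_true,
        true_and, eq_self_iff_true]
      first | trivial | omega
    · rw [if_neg (show ¬((j : Int) < (C : Int) - 1) by omega), if_neg h]
      simp
  rw [s1, s2, s3, s4]

theorem foldl_step (R C : Nat) (l : List (Int × Int)) :
    ∀ (acc : List (Int × Int)) (M : List (List Int)), Shaped R C M →
    (∀ p ∈ l, ∃ a b : Nat, p = ((a : Int), (b : Int)) ∧ a < R ∧ b < C) →
    Shaped R C (l.foldl stepCellA (acc, M)).2 ∧
    (∀ a b, a < R → b < C →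
      pvGN (l.foldl stepCellA (acc, M)).2 a b =
        if ((a : Int), (b : Int)) ∈ l ∧ pvGN M a b < 0 then -(pvGN M a b) else pvGN M a b) ∧
    (∃ news, (l.foldl stepCellA (acc, M)).1 = acc ++ news ∧
      (∀ x, x ∈ news ↔ x ∈ l ∧ ∃ a b : Nat, x = ((a : Int), (b : Int)) ∧ pvGN M a b < 0)) := by
  induction l with
  | nil =>
    intro acc M hM _
    refine ⟨hM, fun a b _ _ => by simp, ⟨[], by simp, fun x => by simp⟩⟩
  | cons p t ih =>
    intro acc M hM hl
    obtain ⟨a0, b0, rfl, ha0, hb0⟩ := hl p List.mem_cons_self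
    have hlt : ∀ p ∈ t, ∃ a b : Nat, p = ((a : Int), (b : Int)) ∧ a < R ∧ b < C :=
      fun p hp => hl p (List.mem_cons_of_mem _ hp)
    rw [List.foldl_cons]
    by_cases hneg : pvGN M a0 b0 < 0
    · have hstep : stepCellA (acc, M) ((a0 : Int), (b0 : Int)) =
          (acc ++ [((a0 : Int), (b0 : Int))], pvSN M a0 b0 (pvGN M a0 b0 * -1)) := by
        simp [stepCellA, pvMGet_cast, pvMSet, Int.toNat_natCast, hneg]
      rw [hstep]
      set M1 := pvSN M a0 b0 (pvGN M a0 b0 * -1) with hM1def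
      have hM1 : Shaped R C M1 := Shaped_pvSN R C M a0 b0 _ hM
      have g1 : ∀ a b : Nat, pvGN M1 a b =
          if a0 = a ∧ b0 = b then -(pvGN M a b) else pvGN M a b := by
        intro a b
        rw [hM1def, pvGN_pvSN]
        by_cases he : a0 = a ∧ b0 = b
        · obtain ⟨rfl, rfl⟩ := he
          rw [if_pos ⟨rfl, rfl, by rw [hM.1]; exact ha0,
            by rw [hM.2 a0 ha0]; exact hb0⟩, if_pos ⟨rfl, rfl⟩]
          ring
        · rw [if_neg (by tauto), if_neg he]
      obtain ⟨S1, P1, news, E1, N1⟩ := ih (acc ++ [((a0 : Int), (b0 : Int))]) M1 hM1 hlt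
      refine ⟨S1, ?_, ⟨((a0 : Int), (b0 : Int)) :: news, ?_, ?_⟩⟩
      · intro a b ha hb
        rw [P1 a b ha hb]
        by_cases he : a0 = a ∧ b0 = b
        · obtain ⟨rfl, rfl⟩ := he
          have hg : pvGN M1 a0 b0 = -(pvGN M a0 b0) := by rw [g1]; simp
          rw [hg]
          have hcond : ¬(((a0 : Int), (b0 : Int)) ∈ t ∧ -(pvGN M a0 b0) < 0) := by
            rintro ⟨-, h⟩; omega
          rw [if_neg hcond, if_pos ⟨List.mem_cons_self, hneg⟩]
        · have hg : pvGN M1 a b = pvGN M a b := by rw [g1, if_neg he]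
          rw [hg]
          by_cases hmt : ((a : Int), (b : Int)) ∈ t
          · by_cases hnn : pvGN M a b < 0
            · rw [if_pos ⟨hmt, hnn⟩, if_pos ⟨List.mem_cons_of_mem _ hmt, hnn⟩]
            · rw [if_neg (by tauto), if_neg (by tauto)]
          · have hnc : ¬(((a : Int), (b : Int)) ∈ ((a0 : Int), (b0 : Int)) :: t) := by
              intro hx
              rcases List.mem_cons.mp hx with hx | hx
              · rw [pair_cast_inj] at hx; exact he ⟨hx.1.symm, hx.2.symm⟩
              · exact hmt hx
            rw [if_neg (by tauto), if_neg (by tauto)]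
      · rw [E1, List.append_assoc]
        rfl
      · intro x
        rw [List.mem_cons, N1 x]
        constructor
        · rintro (rfl | ⟨hxt, a, b, rfl, hx⟩)
          · exact ⟨List.mem_cons_self, a0, b0, rfl, hneg⟩
          · rw [g1 a b] at hx
            by_cases he : a0 = a ∧ b0 = b
            · obtain ⟨rfl, rfl⟩ := he
              rw [if_pos ⟨rfl, rfl⟩] at hx
              omega
            · rw [if_neg he] at hx
              exact ⟨List.mem_cons_of_mem _ hxt, a, b, rfl, hx⟩
        · rintro ⟨hmem, a, b, rfl, hx⟩
          rcases List.mem_cons.mp hmem with he | hxt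
          · rw [pair_cast_inj] at he
            obtain ⟨rfl, rfl⟩ := he
            exact Or.inl rfl
          · by_cases he : a0 = a ∧ b0 = b
            · obtain ⟨rfl, rfl⟩ := he
              exact Or.inl rfl
            · refine Or.inr ⟨hxt, a, b, rfl, ?_⟩
              rw [g1 a b, if_neg he]
              exact hx
    · have hstep : stepCellA (acc, M) ((a0 : Int), (b0 : Int)) = (acc, M) := by
        simp [stepCellA, pvMGet_cast, hneg]
      rw [hstep]
      obtain ⟨S1, P1, news, E1, N1⟩ := ih acc M hM hlt
      refine ⟨S1, ?_, ⟨news, E1, ?_⟩⟩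
      · intro a b ha hb
        rw [P1 a b ha hb]
        by_cases hc : ((a : Int), (b : Int)) ∈ t ∧ pvGN M a b < 0
        · rw [if_pos hc, if_pos ⟨List.mem_cons_of_mem _ hc.1, hc.2⟩]
        · rw [if_neg hc, if_neg ?_]
          rintro ⟨hm, hn⟩
          rcases List.mem_cons.mp hm with hx | hx
          · rw [pair_cast_inj] at hx
            obtain ⟨rfl, rfl⟩ := hx
            exact hneg hn
          · exact hc ⟨hx, hn⟩
      · intro x
        rw [N1 x]
        constructor
        · rintro ⟨hxt, a, b, rfl, hx⟩
          exact ⟨List.mem_cons_of_mem _ hxt, a, b, rfl, hx⟩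
        · rintro ⟨hmem, a, b, rfl, hx⟩
          rcases List.mem_cons.mp hmem with he | hxt
          · rw [pair_cast_inj] at he
            obtain ⟨rfl, rfl⟩ := he
            exact absurd hx hneg
          · exact ⟨hxt, a, b, rfl, hx⟩

theorem nbrQ_cons (i j : Nat) (Q : List (Int × Int)) (a b : Nat) :
    nbrQ (((i : Int), (j : Int)) :: Q) a b ↔ neighb i j a b ∨ nbrQ Q a b := by
  unfold nbrQ
  constructor
  · rintro ⟨i', j', hm, hn⟩
    rcases List.mem_cons.mp hm with he | ht
    · rw [pair_cast_inj] at he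
      obtain ⟨rfl, rfl⟩ := he
      exact Or.inl hn
    · exact Or.inr ⟨i', j', ht, hn⟩
  · rintro (hn | ⟨i', j', ht, hn⟩)
    · exact ⟨i, j, List.mem_cons_self, hn⟩
    · exact ⟨i', j', List.mem_cons_of_mem _ ht, hn⟩

theorem nbrQ_nil (a b : Nat) : ¬ nbrQ [] a b := by
  rintro ⟨i, j, hm, -⟩
  simp at hm

theorem cast_mem_map (L : List (Nat × Nat)) (a b : Nat) :
    (((a : Int), (b : Int)) ∈ L.map (fun p : Nat × Nat => ((p.1 : Int), (p.2 : Int)))) ↔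
      (a, b) ∈ L := by
  rw [List.mem_map]
  constructor
  · rintro ⟨⟨c, d⟩, hm, he⟩
    rw [pair_cast_inj] at he
    obtain ⟨rfl, rfl⟩ := he
    exact hm
  · intro hm
    exact ⟨(a, b), hm, rfl⟩

theorem inner_char (R C : Nat) (Q : List (Int × Int)) :
    ∀ (extra : List (Int × Int)) (M : List (List Int)), Shaped R C M → QB R C Q →
    Shaped R C (innerA Q.length (Q ++ extra) M).2 ∧
    (∀ a b, a < R → b < C →
      (pvGN M a b < 0 ∧ nbrQ Q a b → pvGN (innerA Q.length (Q ++ extra) M).2 a b = -(pvGN M a b)) ∧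
      (¬(pvGN M a b < 0 ∧ nbrQ Q a b) → pvGN (innerA Q.length (Q ++ extra) M).2 a b = pvGN M a b)) ∧
    (∀ x, x ∈ (innerA Q.length (Q ++ extra) M).1 ↔
      x ∈ extra ∨ ∃ a b : Nat, x = ((a : Int), (b : Int)) ∧ a < R ∧ b < C ∧
        pvGN M a b < 0 ∧ nbrQ Q a b) := by
  induction Q with
  | nil =>
    intro extra M hM _
    refine ⟨hM, fun a b _ _ => ⟨fun h => absurd h.2 (nbrQ_nil a b), fun _ => rfl⟩, fun x => ?_⟩
    constructor
    · exact fun hx => Or.inl hx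
    · rintro (hx | ⟨a, b, -, -, -, -, hn⟩)
      · exact hx
      · exact absurd hn (nbrQ_nil a b)
  | cons q Q ih =>
    intro extra M hM hQ
    obtain ⟨i, j, rfl, hi, hj⟩ := hQ q List.mem_cons_self
    have hQt : QB R C Q := fun p hp => hQ p (List.mem_cons_of_mem _ hp)
    have hlen : (((i : Int), (j : Int)) :: Q).length = Q.length + 1 := List.length_cons
    rw [hlen]
    have hunf : innerA (Q.length + 1) ((((i : Int), (j : Int)) :: Q) ++ extra) M =
        innerA Q.length
          ((getAllNeighboursA (i : Int) (j : Int) M).foldl stepCellA (Q ++ extra, M)).1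
          ((getAllNeighboursA (i : Int) (j : Int) M).foldl stepCellA (Q ++ extra, M)).2 := by
      rfl
    rw [hunf]
    rw [nbrsA_eq R C M i j hM hi hj]
    set L := (nbrsN R C i j).map (fun p : Nat × Nat => ((p.1 : Int), (p.2 : Int))) with hL
    have hLok : ∀ p ∈ L, ∃ a b : Nat, p = ((a : Int), (b : Int)) ∧ a < R ∧ b < C := by
      intro p hp
      rw [hL, List.mem_map] at hp
      obtain ⟨⟨a, b⟩, hm, rfl⟩ := hp
      rw [mem_nbrsN R C i j a b hi hj] at hm
      exact ⟨a, b, rfl, hm.1, hm.2.1⟩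
    obtain ⟨S1, P1, news, E1, N1⟩ := foldl_step R C L (Q ++ extra) M hM hLok
    set M1 := (L.foldl stepCellA (Q ++ extra, M)).2 with hM1
    have memL : ∀ a b : Nat, ((a : Int), (b : Int)) ∈ L ↔ (a < R ∧ b < C ∧ neighb i j a b) := by
      intro a b
      rw [hL, cast_mem_map, mem_nbrsN R C i j a b hi hj]
    have g1pos : ∀ a b : Nat, a < R → b < C → neighb i j a b → pvGN M a b < 0 →
        pvGN M1 a b = -(pvGN M a b) := by
      intro a b ha hb hn hneg
      rw [P1 a b ha hb, if_pos ⟨(memL a b).mpr ⟨ha, hb, hn⟩, hneg⟩]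
    have g1neg : ∀ a b : Nat, a < R → b < C → ¬(neighb i j a b ∧ pvGN M a b < 0) →
        pvGN M1 a b = pvGN M a b := by
      intro a b ha hb hc
      rw [P1 a b ha hb, if_neg ?_]
      rintro ⟨hm, hneg⟩
      exact hc ⟨((memL a b).mp hm).2.2, hneg⟩
    have E1' : (L.foldl stepCellA (Q ++ extra, M)).1 = Q ++ (extra ++ news) := by
      rw [E1, List.append_assoc]
    rw [E1']
    obtain ⟨S2, P2, N2⟩ := ih (extra ++ news) M1 S1 hQt
    refine ⟨S2, ?_, ?_⟩
    · intro a b ha hb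
      obtain ⟨P2a, P2b⟩ := P2 a b ha hb
      constructor
      · rintro ⟨hneg, hnq⟩
        rcases (nbrQ_cons i j Q a b).mp hnq with hn | hn
        · have h1 := g1pos a b ha hb hn hneg
          rw [P2b ?_, h1]
          rintro ⟨h2, -⟩
          rw [h1] at h2
          omega
        · by_cases hc : neighb i j a b ∧ pvGN M a b < 0
          · have h1 := g1pos a b ha hb hc.1 hc.2
            rw [P2b ?_, h1]
            rintro ⟨h2, -⟩
            rw [h1] at h2
            omega
          · have h1 := g1neg a b ha hb hc
            rw [P2a ⟨by rw [h1]; exact hneg, hn⟩, h1]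
      · intro hnot
        have hc : ¬(neighb i j a b ∧ pvGN M a b < 0) := by
          rintro ⟨h1, h2⟩
          exact hnot ⟨h2, (nbrQ_cons i j Q a b).mpr (Or.inl h1)⟩
        have h1 := g1neg a b ha hb hc
        rw [P2b ?_, h1]
        rintro ⟨h2, h3⟩
        rw [h1] at h2
        exact hnot ⟨h2, (nbrQ_cons i j Q a b).mpr (Or.inr h3)⟩
    · intro x
      rw [N2 x]
      constructor
      · rintro (hx | ⟨a, b, rfl, ha, hb, hneg, hn⟩)
        · rcases List.mem_append.mp hx with hx | hx
          · exact Or.inl hx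
          · obtain ⟨hxL, a, b, rfl, hneg⟩ := (N1 _).mp hx
            have hm := (memL a b).mp hxL
            exact Or.inr ⟨a, b, rfl, hm.1, hm.2.1, hneg,
              (nbrQ_cons i j Q a b).mpr (Or.inl hm.2.2)⟩
        · by_cases hc : neighb i j a b ∧ pvGN M a b < 0
          · have h1 := g1pos a b ha hb hc.1 hc.2
            rw [h1] at hneg
            omega
          · have h1 := g1neg a b ha hb hc
            rw [h1] at hneg
            exact Or.inr ⟨a, b, rfl, ha, hb, hneg,
              (nbrQ_cons i j Q a b).mpr (Or.inr hn)⟩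
      · rintro (hx | ⟨a, b, rfl, ha, hb, hneg, hn⟩)
        · exact Or.inl (List.mem_append.mpr (Or.inl hx))
        · rcases (nbrQ_cons i j Q a b).mp hn with hn' | hn'
          · refine Or.inl (List.mem_append.mpr (Or.inr ?_))
            exact (N1 _).mpr ⟨(memL a b).mpr ⟨ha, hb, hn'⟩, a, b, rfl, hneg⟩
          · by_cases hc : neighb i j a b ∧ pvGN M a b < 0
            · refine Or.inl (List.mem_append.mpr (Or.inr ?_))
              exact (N1 _).mpr ⟨(memL a b).mpr ⟨ha, hb, hc.1⟩, a, b, rfl, hneg⟩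
            · refine Or.inr ⟨a, b, rfl, ha, hb, ?_, hn'⟩
              rw [g1neg a b ha hb hc]
              exact hneg

theorem mem_toFlipB (M : List (List Int)) (R C a b : Nat) :
    (a, b) ∈ toFlipB M R C ↔
      a < R ∧ b < C ∧ pvGN M a b < 0 ∧ hasPosNbrB M R C a b = true := by
  simp only [toFlipB, List.mem_flatMap, List.mem_range, List.mem_filterMap,
    Option.ite_none_right_eq_some, Option.some.injEq, Bool.and_eq_true, decide_eq_true_iff,
    Prod.mk.injEq]
  constructor
  · rintro ⟨i, hi, j, hj, ⟨hc1, hc2⟩, rfl, rfl⟩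
    exact ⟨hi, hj, hc1, hc2⟩
  · rintro ⟨ha, hb, hneg, hpos⟩
    exact ⟨a, ha, b, hb, ⟨hneg, hpos⟩, rfl, rfl⟩

theorem hasPosNbrB_iff (M : List (List Int)) (R C a b : Nat) (ha : a < R) (hb : b < C) :
    hasPosNbrB M R C a b = true ↔
      ∃ i j, i < R ∧ j < C ∧ neighb a b i j ∧ 0 < pvGN M i j := by
  simp only [hasPosNbrB, Bool.or_eq_true, Bool.and_eq_true, decide_eq_true_iff]
  constructor
  · rintro (((⟨h, hp⟩ | ⟨h, hp⟩) | ⟨h, hp⟩) | ⟨h, hp⟩)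
    · exact ⟨a - 1, b, by omega, hb, by unfold neighb; omega, hp⟩
    · exact ⟨a + 1, b, h, hb, by unfold neighb; omega, hp⟩
    · exact ⟨a, b - 1, ha, by omega, by unfold neighb; omega, hp⟩
    · exact ⟨a, b + 1, ha, h, by unfold neighb; omega, hp⟩
  · rintro ⟨i, j, hi, hj, hn, hp⟩
    unfold neighb at hn
    rcases hn with ⟨h1, h2⟩ | ⟨h1, h2⟩ | ⟨h1, h2⟩ | ⟨h1, h2⟩
    · refine Or.inl (Or.inl (Or.inl ⟨by omega, ?_⟩))
      have e1 : a - 1 = i := by omega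
      have e2 : b = j := by omega
      rw [e1, e2]; exact hp
    · refine Or.inl (Or.inl (Or.inr ⟨by omega, ?_⟩))
      have e1 : a + 1 = i := by omega
      have e2 : b = j := by omega
      rw [e1, e2]; exact hp
    · refine Or.inl (Or.inr ⟨by omega, ?_⟩)
      have e1 : b - 1 = j := by omega
      have e2 : a = i := by omega
      rw [e1, e2]; exact hp
    · refine Or.inr ⟨by omega, ?_⟩
      have e1 : b + 1 = j := by omega
      have e2 : a = i := by omega
      rw [e1, e2]; exact hp

theorem toFlipB_nodup (M : List (List Int)) (R C : Nat) : (toFlipB M R C).Nodup := by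
  unfold toFlipB
  rw [List.nodup_flatMap]
  constructor
  · intro i _
    apply List.Nodup.filterMap ?_ (List.nodup_range)
    intro x y c hx hy
    rw [Option.mem_def] at hx hy
    obtain ⟨-, e1⟩ := Option.ite_none_right_eq_some.mp hx
    obtain ⟨-, e2⟩ := Option.ite_none_right_eq_some.mp hy
    have h3 : some (i, x) = some (i, y) := e1.trans e2.symm
    simpa using h3
  · apply List.Pairwise.imp ?_ (List.pairwise_lt_range)
    intro i i' hlt
    intro x hx hx'
    simp only [List.mem_filterMap, List.mem_range, Option.ite_none_right_eq_some] at hx hx'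
    obtain ⟨j1, hj1, -, e1⟩ := hx
    obtain ⟨j2, hj2, -, e2⟩ := hx'
    have h3 : some (i, j1) = some (i', j2) := by rw [e1, e2]
    simp at h3
    omega

theorem flipAllB_char (R C : Nat) (s : List (Nat × Nat)) :
    ∀ (M : List (List Int)), Shaped R C M → s.Nodup →
    (∀ c ∈ s, c.1 < R ∧ c.2 < C) →
    Shaped R C (flipAllB M s) ∧
    (∀ a b, a < R → b < C →
      pvGN (flipAllB M s) a b = if (a, b) ∈ s then -(pvGN M a b) else pvGN M a b) := by
  induction s with
  | nil =>
    intro M hM _ _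
    exact ⟨hM, fun a b _ _ => by simp [flipAllB]⟩
  | cons c t ih =>
    intro M hM hnd hb
    obtain ⟨a0, b0⟩ := c
    have hb0 := hb (a0, b0) List.mem_cons_self
    have hM1 : Shaped R C (pvSN M a0 b0 (-(pvGN M a0 b0))) := Shaped_pvSN R C M a0 b0 _ hM
    have g1 : ∀ a b : Nat, pvGN (pvSN M a0 b0 (-(pvGN M a0 b0))) a b =
        if a0 = a ∧ b0 = b then -(pvGN M a b) else pvGN M a b := by
      intro a b
      rw [pvGN_pvSN]
      by_cases he : a0 = a ∧ b0 = b
      · obtain ⟨rfl, rfl⟩ := he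
        rw [if_pos ⟨rfl, rfl, by rw [hM.1]; exact hb0.1,
          by rw [hM.2 a0 hb0.1]; exact hb0.2⟩, if_pos ⟨rfl, rfl⟩]
      · rw [if_neg (by tauto), if_neg he]
    have hstep : flipAllB M ((a0, b0) :: t) = flipAllB (pvSN M a0 b0 (-(pvGN M a0 b0))) t := rfl
    rw [hstep]
    obtain ⟨S1, P1⟩ := ih (pvSN M a0 b0 (-(pvGN M a0 b0))) hM1 (List.Nodup.of_cons hnd)
      (fun c hc => hb c (List.mem_cons_of_mem _ hc))
    refine ⟨S1, fun a b ha hbb => ?_⟩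
    rw [P1 a b ha hbb, g1 a b]
    have hhead : (a0, b0) ∉ t := (List.nodup_cons.mp hnd).1
    by_cases he : a0 = a ∧ b0 = b
    · obtain ⟨rfl, rfl⟩ := he
      rw [if_neg (by simpa using hhead), if_pos ⟨rfl, rfl⟩, if_pos List.mem_cons_self]
    · rw [if_neg he]
      by_cases hmt : (a, b) ∈ t
      · rw [if_pos hmt, if_pos (List.mem_cons_of_mem _ hmt)]
      · rw [if_neg hmt, if_neg ?_]
        intro hx
        rcases List.mem_cons.mp hx with hx | hx
        · exact he ⟨congrArg Prod.fst hx.symm, congrArg Prod.snd hx.symm⟩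
        · exact hmt hx

theorem outerA_nil (n : Nat) (M : List (List Int)) : outerA n [] M = 0 := by
  cases n <;> simp [outerA]

theorem step_eq (R C : Nat) (M : List (List Int)) (Q : List (Int × Int))
    (hM : Shaped R C M) (hQ : QOK R C M Q) (hI : InvW R C M Q) :
    Shaped R C (innerA Q.length Q M).2 ∧
    (innerA Q.length Q M).2 = flipAllB M (toFlipB M R C) ∧
    ((innerA Q.length Q M).1 = [] ↔ toFlipB M R C = []) ∧
    QOK R C (innerA Q.length Q M).2 (innerA Q.length Q M).1 ∧
    InvW R C (innerA Q.length Q M).2 (innerA Q.length Q M).1 := by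
  have hQB : QB R C Q := by
    intro p hp
    obtain ⟨i, j, rfl, hi, hj, -⟩ := hQ p hp
    exact ⟨i, j, rfl, hi, hj⟩
  obtain ⟨S1, P1, N1⟩ := inner_char R C Q [] M hM hQB
  rw [List.append_nil] at S1 P1 N1
  have hsb : ∀ c ∈ toFlipB M R C, c.1 < R ∧ c.2 < C := by
    rintro ⟨a, b⟩ hc
    obtain ⟨ha, hb, -, -⟩ := (mem_toFlipB M R C a b).mp hc
    exact ⟨ha, hb⟩
  obtain ⟨S2, P2⟩ := flipAllB_char R C (toFlipB M R C) M hM (toFlipB_nodup M R C) hsb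
  have hcond : ∀ a b : Nat, a < R → b < C →
      ((pvGN M a b < 0 ∧ nbrQ Q a b) ↔ (a, b) ∈ toFlipB M R C) := by
    intro a b ha hb
    constructor
    · rintro ⟨hneg, i', j', hm, hn⟩
      obtain ⟨i2, j2, he, hi2, hj2, hp2⟩ := hQ _ hm
      rw [pair_cast_inj] at he
      obtain ⟨rfl, rfl⟩ := he
      refine (mem_toFlipB M R C a b).mpr ⟨ha, hb, hneg, ?_⟩
      exact (hasPosNbrB_iff M R C a b ha hb).mpr ⟨i', j', hi2, hj2, (neighb_symm _ _ _ _).mp hn, hp2⟩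
    · intro hmem
      obtain ⟨-, -, hneg, hpos⟩ := (mem_toFlipB M R C a b).mp hmem
      obtain ⟨i', j', hi', hj', hn, hp⟩ := (hasPosNbrB_iff M R C a b ha hb).mp hpos
      refine ⟨hneg, hI a b ha hb hneg ⟨i', j', hi', hj', hn, hp⟩⟩
  have hmeq : (innerA Q.length Q M).2 = flipAllB M (toFlipB M R C) := by
    apply mat_ext R C _ _ S1 S2
    intro a b ha hb
    obtain ⟨P1a, P1b⟩ := P1 a b ha hb
    by_cases hc : pvGN M a b < 0 ∧ nbrQ Q a b
    · rw [P1a hc, P2 a b ha hb, if_pos ((hcond a b ha hb).mp hc)]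
    · rw [P1b hc, P2 a b ha hb, if_neg (fun hm => hc ((hcond a b ha hb).mpr hm))]
  refine ⟨S1, hmeq, ?_, ?_, ?_⟩
  · constructor
    · intro hnil
      rw [List.eq_nil_iff_forall_not_mem]
      rintro ⟨a, b⟩ hmem
      obtain ⟨ha, hb⟩ := hsb _ hmem
      have hc := (hcond a b ha hb).mpr hmem
      have : (((a : Int), (b : Int)) ∈ (innerA Q.length Q M).1) :=
        (N1 _).mpr (Or.inr ⟨a, b, rfl, ha, hb, hc.1, hc.2⟩)
      rw [hnil] at this
      simp at this
    · intro hs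
      rw [List.eq_nil_iff_forall_not_mem]
      intro x hx
      rcases (N1 x).mp hx with hfalse | ⟨a, b, rfl, ha, hb, hneg, hn⟩
      · simp at hfalse
      · have := (hcond a b ha hb).mp ⟨hneg, hn⟩
        rw [hs] at this
        simp at this
  · intro p hp
    rcases (N1 p).mp hp with hfalse | ⟨a, b, rfl, ha, hb, hneg, hn⟩
    · simp at hfalse
    · refine ⟨a, b, rfl, ha, hb, ?_⟩
      rw [(P1 a b ha hb).1 ⟨hneg, hn⟩]
      omega
  · intro a b ha hb hneg2 hpos2
    obtain ⟨i', j', hi', hj', hn, hp⟩ := hpos2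
    have hcnot : ¬(pvGN M a b < 0 ∧ nbrQ Q a b) := by
      intro hc
      rw [(P1 a b ha hb).1 hc] at hneg2
      omega
    have hvala : pvGN (innerA Q.length Q M).2 a b = pvGN M a b := (P1 a b ha hb).2 hcnot
    have hnegM : pvGN M a b < 0 := by rw [← hvala]; exact hneg2
    have hnotQ : ¬ nbrQ Q a b := fun hn2 => hcnot ⟨hnegM, hn2⟩
    by_cases hcp : pvGN M i' j' < 0 ∧ nbrQ Q i' j'
    · have hmem : (i', j') ∈ toFlipB M R C := (hcond i' j' hi' hj').mp hcp
      refine ⟨i', j', (N1 _).mpr (Or.inr ⟨i', j', rfl, hi', hj', hcp.1, hcp.2⟩),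
        (neighb_symm _ _ _ _).mp hn⟩
    · have hvalp : pvGN (innerA Q.length Q M).2 i' j' = pvGN M i' j' := (P1 i' j' hi' hj').2 hcp
      have hpM : 0 < pvGN M i' j' := by rw [← hvalp]; exact hp
      have hmem : (a, b) ∈ toFlipB M R C := by
        refine (mem_toFlipB M R C a b).mpr ⟨ha, hb, hnegM, ?_⟩
        exact (hasPosNbrB_iff M R C a b ha hb).mpr ⟨i', j', hi', hj', hn, hpM⟩
      exact absurd ((hcond a b ha hb).mpr hmem).2 hnotQ

theorem sim (R C : Nat) : ∀ (n : Nat) (M : List (List Int)) (Q : List (Int × Int)),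
    Shaped R C M → QOK R C M Q → InvW R C M Q →
    outerA n Q M = if Q.isEmpty then 0 else loopB n M R C := by
  intro n
  induction n with
  | zero =>
    intro M Q hM hQ hI
    cases Q <;> simp [outerA, loopB]
  | succ n ihn =>
    intro M Q hM hQ hI
    cases Q with
    | nil => simp [outerA]
    | cons q Qt =>
      obtain ⟨S2, hMeq, hiff, hQOK', hInv'⟩ := step_eq R C M (q :: Qt) hM hQ hI
      have hlhs : outerA (n + 1) (q :: Qt) M =
          1 + outerA n (innerA (q :: Qt).length (q :: Qt) M).1
            (innerA (q :: Qt).length (q :: Qt) M).2 := by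
        rfl
      rw [hlhs]
      rw [show ((q :: Qt).isEmpty) = false from rfl]
      simp only [Bool.false_eq_true, if_false]
      by_cases hs : toFlipB M R C = []
      · rw [hiff.mpr hs, outerA_nil]
        have : loopB (n + 1) M R C = 1 := by
          unfold loopB
          rw [hs]
          simp
        rw [this]
        omega
      · have hne : (innerA (q :: Qt).length (q :: Qt) M).1 ≠ [] := by
          intro h
          exact hs (hiff.mp h)
        have hrhs : loopB (n + 1) M R C = 1 + loopB n (flipAllB M (toFlipB M R C)) R C := by
          rw [show loopB (n + 1) M R C = if (toFlipB M R C).isEmpty then 1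
            else 1 + loopB n (flipAllB M (toFlipB M R C)) R C from rfl]
          rw [if_neg (by simpa [List.isEmpty_iff] using hs)]
        rw [hrhs]
        rw [ihn _ _ S2 hQOK' hInv', if_neg (by simpa [List.isEmpty_iff] using hne), hMeq]

theorem mem_posIdx (M : List (List Int)) (x : Int × Int) :
    x ∈ getAllPositiveIndicesA M ↔
      ∃ i j : Nat, x = ((i : Int), (j : Int)) ∧ i < M.length ∧
        j < (M.getD i []).length ∧ 0 < pvGN M i j := by
  simp only [getAllPositiveIndicesA, List.mem_flatMap, List.mem_range, List.mem_filterMap,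
    Option.ite_none_right_eq_some, Option.some.injEq]
  constructor
  · rintro ⟨i, hi, j, hj, hc, he⟩
    exact ⟨i, j, he.symm, hi, hj, hc⟩
  · rintro ⟨i, j, rfl, hi, hj, hp⟩
    exact ⟨i, hi, j, hj, hp, rfl⟩

theorem anyPosB_iff (M : List (List Int)) :
    anyPosB M = true ↔
      ∃ i j : Nat, i < M.length ∧ j < (M.getD i []).length ∧ 0 < pvGN M i j := by
  unfold anyPosB
  simp only [List.any_eq_true]
  constructor
  · rintro ⟨row, hrow, v, hv, hp⟩
    obtain ⟨i, hi, rfl⟩ := List.mem_iff_getElem.mp hrow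
    obtain ⟨j, hj, rfl⟩ := List.mem_iff_getElem.mp hv
    have e1 : M.getD i [] = M[i] := List.getD_eq_getElem M [] hi
    refine ⟨i, j, hi, by rw [e1]; exact hj, ?_⟩
    unfold pvGN
    rw [e1, List.getD_eq_getElem _ 0 hj]
    exact of_decide_eq_true hp
  · rintro ⟨i, j, hi, hj, hp⟩
    have e1 : M.getD i [] = M[i] := List.getD_eq_getElem M [] hi
    rw [e1] at hj
    refine ⟨M[i], List.getElem_mem hi, M[i][j], List.getElem_mem hj, decide_eq_true ?_⟩
    unfold pvGN at hp
    rwa [e1, List.getD_eq_getElem _ 0 hj] at hp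

-- ===== VERDICT (by name: the statement is the Claim_ definition above) =====
theorem getNegetives_spec : Claim_equal_getNegetives := by
  unfold Claim_equal_getNegetives Spec_getNegetives
  intro M hDom hPre
  unfold getNegetives getNegetives_alt
  by_cases hA : anyPosB M = true
  · -- there is a positive entry, so Pre_ gives rectangularity
    have hRect : ∀ row ∈ M, row.length = (M.headD []).length := by
      rcases hPre with h | h
      · exact h
      · exfalso
        obtain ⟨i, j, hi, hj, hp⟩ := (anyPosB_iff M).mp hA
        have e1 : M.getD i [] = M[i] := List.getD_eq_getElem M [] hi
        rw [e1] at hj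
        have hv := h M[i] (List.getElem_mem hi) M[i][j] (List.getElem_mem hj)
        unfold pvGN at hp
        rw [e1, List.getD_eq_getElem _ 0 hj] at hp
        omega
    have hM : Shaped M.length (M.headD []).length M := by
      refine ⟨rfl, fun k hk => ?_⟩
      rw [List.getD_eq_getElem M [] hk]
      exact hRect _ (List.getElem_mem hk)
    have hQOK : QOK M.length (M.headD []).length M (getAllPositiveIndicesA M) := by
      intro p hp
      obtain ⟨i, j, rfl, hi, hj, hp2⟩ := (mem_posIdx M p).mp hp
      refine ⟨i, j, rfl, hi, ?_, hp2⟩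
      rw [← hM.2 i hi]
      exact hj
    have hInv : InvW M.length (M.headD []).length M (getAllPositiveIndicesA M) := by
      rintro a b ha hb hneg ⟨i', j', hi', hj', hn, hp⟩
      refine ⟨i', j', (mem_posIdx M _).mpr ⟨i', j', rfl, hi', ?_, hp⟩,
        (neighb_symm _ _ _ _).mp hn⟩
      rw [hM.2 i' hi']
      exact hj'
    have hQne : getAllPositiveIndicesA M ≠ [] := by
      obtain ⟨i, j, hi, hj, hp⟩ := (anyPosB_iff M).mp hA
      intro h
      have hmem := (mem_posIdx M ((i : Int), (j : Int))).mpr ⟨i, j, rfl, hi, hj, hp⟩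
      rw [h] at hmem
      simp at hmem
    rw [sim M.length (M.headD []).length _ M _ hM hQOK hInv,
      if_neg (by simpa [List.isEmpty_iff] using hQne), if_pos hA]
  · have hPosEmpty : getAllPositiveIndicesA M = [] := by
      rw [List.eq_nil_iff_forall_not_mem]
      intro x hx
      obtain ⟨i, j, -, hi, hj, hp⟩ := (mem_posIdx M x).mp hx
      exact hA ((anyPosB_iff M).mpr ⟨i, j, hi, hj, hp⟩)
    rw [hPosEmpty, outerA_nil, if_neg hA]
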